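-- pv_equiv track=rewrite | github.com/lbl-srg/BuildingsPy | buildingspy/development/merger.py | remove_library_specific_documentation
-- ===== SOURCE A (Python) =====
-- def remove_library_specific_documentation(file_lines, library_name):
--     """ Remove library specific content.
--
--         For example, for the `Buildings` and `IDEAS` libraries, include the
--         section in the commented block below, but keep the comment as an html-comment
--         for other libraries.
--
--         .. code-block:: html
--
--            <!-- @include_Buildings @include_IDEAS
--            some documentation to be used for
--            Buildings and IDEAS library only.
--            -->
--
--     :param file_lines: The lines of the file to be merged.
--     :return: The lines of the files, with comments removed as indicated by the tag(s) in the comment line.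
--     """
--
--     lines = list()
--     pattern_start = "<!--"
--     library_token = "@include_{}".format(library_name)
--     pattern_end = "-->"
--     search_start = True
--     for lin in file_lines:
--         if search_start and pattern_start in lin and library_token in lin:
--             # Found the start of the commented section for this library.
--             # Remove this line
--             search_start = False
--         elif (not search_start) and pattern_end in lin:
--             # Found the end of the line
--             # Reove this line
--             search_start = True
--         else:
--             lines.append(lin)
--
--     return lines
-- ===== SOURCE B (Python) =====
-- def remove_library_specific_documentation(file_lines, library_name):
--     token = "@include_" + library_name
--     out = []
--     i = 0
--     n = len(file_lines)
--     while i < n: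
--         line = file_lines[i]
--         i += 1
--         if "<!--" in line and token in line:
--             # drop this start line, keep interior lines, drop the closing '-->' line
--             while i < n and "-->" not in file_lines[i]:
--                 out.append(file_lines[i])
--                 i += 1
--             i += 1  # consume the terminator line (no-op at EOF)
--         else:
--             out.append(line)
--     return out
-- ===== Notes on version B (the rewrite author's own statement) =====
-- stated objective: alternative
-- what changed: Replaces A's single pass with a toggling search_start flag by an index-based outer while loop that, on a start-marker line, runs an inner loop copying interior lines until the '-->' terminator is consumed.
import Mathlib
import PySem

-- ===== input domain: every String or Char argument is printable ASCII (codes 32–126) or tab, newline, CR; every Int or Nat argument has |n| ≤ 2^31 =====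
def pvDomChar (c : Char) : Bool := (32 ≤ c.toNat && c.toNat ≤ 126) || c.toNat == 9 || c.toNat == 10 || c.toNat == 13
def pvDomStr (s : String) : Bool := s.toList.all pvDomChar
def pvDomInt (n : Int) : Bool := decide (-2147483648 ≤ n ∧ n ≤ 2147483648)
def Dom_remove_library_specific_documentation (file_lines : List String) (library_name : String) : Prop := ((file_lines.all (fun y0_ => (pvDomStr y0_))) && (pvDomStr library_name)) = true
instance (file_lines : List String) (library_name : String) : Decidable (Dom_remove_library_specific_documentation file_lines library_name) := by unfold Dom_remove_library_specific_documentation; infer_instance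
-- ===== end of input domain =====

-- B replaces A's boolean search_start flag with a two-phase nested-loop decomposition
-- (outer scan / inner scan-to-terminator); same return value, no speed claim.


-- ===== PORT A =====
def pvStepA (library_token : String) (st : List String × Bool) (lin : String) : List String × Bool :=
  if st.2 && PySem.Str.isIn "<!--" lin && PySem.Str.isIn library_token lin then
    (st.1, false)
  else if (!st.2) && PySem.Str.isIn "-->" lin then
    (st.1, true)
  else
    (st.1 ++ [lin], st.2)

def remove_library_specific_documentation (file_lines : List String) (library_name : String) : List String :=
  let library_token := "@include_" ++ library_name
  (file_lines.foldl (pvStepA library_token) (([] : List String), true)).1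

-- ===== PORT B =====
mutual
def pvOuterB (tok : String) : List String → List String
  | [] => []
  | l :: rest =>
    if PySem.Str.isIn "<!--" l && PySem.Str.isIn tok l then pvInnerB tok rest
    else l :: pvOuterB tok rest
def pvInnerB (tok : String) : List String → List String
  | [] => []
  | l :: rest =>
    if PySem.Str.isIn "-->" l then pvOuterB tok rest
    else l :: pvInnerB tok rest
end

def remove_library_specific_documentation_alt (file_lines : List String) (library_name : String) : List String :=
  pvOuterB ("@include_" ++ library_name) file_lines

-- ===== PRECONDITION & SPEC =====
def Spec_remove_library_specific_documentation (file_lines : List String) (library_name : String) (out : List String) : Prop := out = remove_library_specific_documentation_alt file_lines library_name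
instance (file_lines : List String) (library_name : String) (out : List String) : Decidable (Spec_remove_library_specific_documentation file_lines library_name out) := by unfold Spec_remove_library_specific_documentation; infer_instance

-- ===== CLAIM (what is proved, stated in full; the proofs are below) =====
def Claim_equal_remove_library_specific_documentation : Prop := ∀ (file_lines : List String) (library_name : String), Dom_remove_library_specific_documentation file_lines library_name → Spec_remove_library_specific_documentation file_lines library_name (remove_library_specific_documentation file_lines library_name)

-- ===== LEMMAS AND PROOFS =====
-- Loop invariant: folding A's flag-machine from flag=true computes acc ++ outer-phase,
-- and from flag=false computes acc ++ inner-phase of B's two-phase recursion.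
theorem pvFold_eq (tok : String) : ∀ (xs acc : List String),
    (xs.foldl (pvStepA tok) (acc, true)).1 = acc ++ pvOuterB tok xs
    ∧ (xs.foldl (pvStepA tok) (acc, false)).1 = acc ++ pvInnerB tok xs := by
  intro xs
  induction xs with
  | nil => intro acc; simp [pvOuterB, pvInnerB]
  | cons l rest ih =>
    intro acc
    refine ⟨?_, ?_⟩ <;> simp only [List.foldl, pvStepA, pvOuterB, pvInnerB] <;>
      split_ifs <;> simp_all

-- ===== VERDICT (by name: the statement is the Claim_ definition above) =====
theorem remove_library_specific_documentation_spec : Claim_equal_remove_library_specific_documentation := by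
  intro file_lines library_name _
  show _ = _
  simpa [remove_library_specific_documentation, remove_library_specific_documentation_alt]
    using (pvFold_eq ("@include_" ++ library_name) file_lines []).1
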